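-- pv_equiv track=rewrite | github.com/VoxNut/Littera | statistic_datasets.py | classifyLabel
-- ===== SOURCE A (Python) =====
-- def classifyLabel(s: str) -> str:
--     """
--     Classify a text label by its case pattern
--
--     Args:
--         s: Input string to classify
--
--     Returns:
--         'all_upper': All letters are uppercase (e.g., "HELLO", "HELLO123")
--         'all_lower': All letters are lowercase (e.g., "hello", "hello123")
--         'mixed': Mix of upper and lowercase (e.g., "Hello", "HeLLo")
--         'no_letters': No letters found (e.g., "123", "!@#")
--     """
--     letters = [c for c in s if c.isalpha()]
--
--     if not letters:
--         return "no_letters"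
--
--     if all(c.isupper() for c in letters):
--         return "all_upper"
--
--     if all(c.islower() for c in letters):
--         return "all_lower"
--
--     return "mixed"
-- ===== SOURCE B (Python) =====
-- def classifyLabel(s: str) -> str:
--     seen_letter = False
--     all_upper = True
--     all_lower = True
--     for c in s:
--         if c.isalpha():
--             seen_letter = True
--             if not c.isupper():
--                 all_upper = False
--             if not c.islower():
--                 all_lower = False
--     if not seen_letter:
--         return "no_letters"
--     if all_upper:
--         return "all_upper"
--     if all_lower:
--         return "all_lower"
--     return "mixed"
-- ===== Notes on version B (the rewrite author's own statement) =====
-- stated objective: alternative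
-- what changed: Replaces the intermediate letters list and the two separate all() scans with a single pass that maintains three boolean flags (seen_letter, all_upper, all_lower).
import Mathlib
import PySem

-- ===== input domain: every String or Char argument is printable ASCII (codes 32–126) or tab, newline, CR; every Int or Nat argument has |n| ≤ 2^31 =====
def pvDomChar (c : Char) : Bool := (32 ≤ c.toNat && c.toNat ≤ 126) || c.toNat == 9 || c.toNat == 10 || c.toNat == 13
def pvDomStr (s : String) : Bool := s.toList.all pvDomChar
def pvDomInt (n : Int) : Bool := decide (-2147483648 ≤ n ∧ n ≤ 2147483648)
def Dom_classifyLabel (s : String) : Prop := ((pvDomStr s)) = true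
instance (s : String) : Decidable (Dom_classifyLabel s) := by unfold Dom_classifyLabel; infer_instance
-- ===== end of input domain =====

-- B replaces A's intermediate letters list and two all() scans with one pass over the
-- string maintaining three boolean flags (alternative decomposition, same cost).

-- ===== PORT A =====
def classifyLabel (s : String) : String :=
  let letters := s.toList.filter (fun c => PySem.Chars.isalpha c)
  if letters = [] then "no_letters"
  else if letters.all (fun c => PySem.Chars.isupper c) then "all_upper"
  else if letters.all (fun c => PySem.Chars.islower c) then "all_lower"
  else "mixed"

-- ===== PORT B =====
def classifyLabelStep (st : Bool × Bool × Bool) (c : Char) : Bool × Bool × Bool :=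
  if PySem.Chars.isalpha c then
    (true,
     (if ¬ PySem.Chars.isupper c then false else st.2.1),
     (if ¬ PySem.Chars.islower c then false else st.2.2))
  else st

def classifyLabel_alt (s : String) : String :=
  let st := s.toList.foldl classifyLabelStep (false, true, true)
  if st.1 = false then "no_letters"
  else if st.2.1 then "all_upper"
  else if st.2.2 then "all_lower"
  else "mixed"

-- ===== PRECONDITION & SPEC =====
def Spec_classifyLabel (s : String) (out : String) : Prop := out = classifyLabel_alt s
instance (s : String) (out : String) : Decidable (Spec_classifyLabel s out) := by unfold Spec_classifyLabel; infer_instance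

-- ===== CLAIM (what is proved, stated in full; the proofs are below) =====
def Claim_equal_classifyLabel : Prop := ∀ (s : String), Dom_classifyLabel s → Spec_classifyLabel s (classifyLabel s)

-- ===== LEMMAS AND PROOFS =====

lemma classifyLabel_fold_inv (l : List Char) (a u lo : Bool) :
    l.foldl classifyLabelStep (a, u, lo) =
      (a || !(l.filter (fun c => PySem.Chars.isalpha c)).isEmpty,
       u && (l.filter (fun c => PySem.Chars.isalpha c)).all (fun c => PySem.Chars.isupper c),
       lo && (l.filter (fun c => PySem.Chars.isalpha c)).all (fun c => PySem.Chars.islower c)) := by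
  induction l generalizing a u lo with
  | nil => simp
  | cons c t ih =>
    by_cases h : PySem.Chars.isalpha c = true <;>
    by_cases hu : PySem.Chars.isupper c = true <;>
    by_cases hl : PySem.Chars.islower c = true <;>
      simp [classifyLabelStep, h, hu, hl, ih]

-- ===== VERDICT (by name: the statement is the Claim_ definition above) =====
theorem classifyLabel_spec : Claim_equal_classifyLabel := by
  intro s _
  unfold Spec_classifyLabel classifyLabel classifyLabel_alt
  rw [classifyLabel_fold_inv]
  simp only [Bool.false_or, Bool.true_and]
  by_cases he : s.toList.filter (fun c => PySem.Chars.isalpha c) = [] <;>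
    simp [he, List.isEmpty_iff]
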